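-- pv_equiv track=rewrite | github.com/earthai-tech/geoprior-v3 | geoprior/plot/forecast.py | _get_metrics_from_cols
-- ===== SOURCE A (Python) =====
-- def _get_metrics_from_cols(
--     columns: list[str], prefixes: list[str]
-- ) -> list[str]:
--     """Extracts metric suffixes (e.g., q10, actual) from column names."""
--     metrics = set()
--     for col in columns:
--         for p in prefixes:
--             if col.startswith(p + "_"):
--                 metrics.add(col[len(p) + 1 :])
--     return sorted(list(metrics))
-- ===== SOURCE B (Python) =====
-- def _get_metrics_from_cols(columns, prefixes):
--     """Extracts metric suffixes (e.g., q10, actual) from column names."""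
--     pref = set(prefixes)
--     return sorted({
--         col[i + 1:]
--         for col in columns
--         for i in range(len(col))
--         if col[i] == "_" and col[:i] in pref
--     })
-- ===== Notes on version B (the rewrite author's own statement) =====
-- stated objective: faster
-- what changed: Instead of testing every prefix against every column with startswith, B builds a set of the prefixes once and forms, in one set comprehension, the suffix after each underscore of each column whose text before the underscore is in that set.
import Mathlib
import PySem

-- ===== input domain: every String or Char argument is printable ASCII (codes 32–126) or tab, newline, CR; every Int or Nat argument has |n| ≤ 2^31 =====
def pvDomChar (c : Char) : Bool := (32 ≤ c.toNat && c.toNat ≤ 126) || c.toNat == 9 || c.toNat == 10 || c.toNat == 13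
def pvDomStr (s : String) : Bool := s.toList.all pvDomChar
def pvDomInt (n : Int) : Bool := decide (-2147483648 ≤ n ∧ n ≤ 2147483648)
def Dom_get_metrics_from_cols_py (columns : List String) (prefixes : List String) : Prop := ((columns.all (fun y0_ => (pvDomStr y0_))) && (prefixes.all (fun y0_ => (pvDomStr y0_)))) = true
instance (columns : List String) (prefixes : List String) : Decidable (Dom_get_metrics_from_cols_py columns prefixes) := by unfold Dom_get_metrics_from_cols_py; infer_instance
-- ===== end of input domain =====

-- B replaces A's prefixes×columns startswith scan by one set comprehension over the underscore positions of each column, with a hash lookup of the text before each underscore in a prebuilt prefix set (alternative algorithm, same result).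

-- ===== PORT A =====
-- literal transliteration of A: nested loops over columns and prefixes, conditional set.add, sorted at the end
def get_metrics_from_cols_py (columns : List String) (prefixes : List String) : List String :=
  let metrics : PySem.Set String :=
    columns.foldl (fun m col =>
      prefixes.foldl (fun m p =>
        if PySem.Str.startswith col (p ++ "_") then
          PySem.Set.add m (PySem.Str.slice col (some (PySem.Str.len p + 1)) none)
        else m) m) PySem.Set.empty
  PySem.List.sorted metrics (fun x => x) false

-- ===== PORT B =====
-- literal transliteration of B: one set comprehension (ported as Set.ofList of the generated list) over range(len(col)) filtered on col[i] == '_' and col[:i] in pref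
def get_metrics_from_cols_py_alt (columns : List String) (prefixes : List String) : List String :=
  let pref : PySem.Set String := PySem.Set.ofList prefixes
  PySem.List.sorted
    (PySem.Set.ofList (columns.flatMap (fun col =>
      ((PySem.List.pyRange 0 (PySem.Str.len col) 1).filter (fun i =>
          PySem.Str.pyGet? col i == some '_' &&
          PySem.Set.contains pref (PySem.Str.slice col none (some i)))).map
        (fun i => PySem.Str.slice col (some (i + 1)) none))))
    (fun x => x) false

-- ===== PRECONDITION & SPEC =====
def Spec_get_metrics_from_cols_py (columns : List String) (prefixes : List String) (out : List String) : Prop := out = get_metrics_from_cols_py_alt columns prefixes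
instance (columns : List String) (prefixes : List String) (out : List String) : Decidable (Spec_get_metrics_from_cols_py columns prefixes out) := by unfold Spec_get_metrics_from_cols_py; infer_instance

-- ===== CLAIM (what is proved, stated in full; the proofs are below) =====
def Claim_equal_get_metrics_from_cols_py : Prop := ∀ (columns : List String) (prefixes : List String), Dom_get_metrics_from_cols_py columns prefixes → Spec_get_metrics_from_cols_py columns prefixes (get_metrics_from_cols_py columns prefixes)

-- ===== LEMMAS AND PROOFS =====

-- membership of A's doubly-nested fold that conditionally adds one element per inner item
theorem mem_foldl2_cond_add {α β : Type} (l : List α) (g : α → List β) (c : α → β → Bool)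
    (v : α → β → String) (m : PySem.Set String) (x : String) :
    (x ∈ l.foldl (fun m a => (g a).foldl (fun m b =>
        if c a b then PySem.Set.add m (v a b) else m) m) m) ↔
      (x ∈ m ∨ ∃ a ∈ l, ∃ b ∈ g a, c a b = true ∧ x = v a b) := by
  have inner : ∀ (a : α) (m : PySem.Set String),
      (x ∈ (g a).foldl (fun m b => if c a b then PySem.Set.add m (v a b) else m) m) ↔
        (x ∈ m ∨ ∃ b ∈ g a, c a b = true ∧ x = v a b) := by
    intro a
    induction g a with
    | nil => simp
    | cons b bs ih =>
      intro m
      simp only [List.foldl_cons, ih]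
      by_cases h : c a b = true
      · simp only [h, if_true, PySem.Set.mem_add, List.mem_cons]
        constructor
        · rintro ((hm | hx) | ⟨b', hb', hc, hx⟩)
          · exact Or.inl hm
          · exact Or.inr ⟨b, Or.inl rfl, h, hx⟩
          · exact Or.inr ⟨b', Or.inr hb', hc, hx⟩
        · rintro (hm | ⟨b', (rfl | hb'), hc, hx⟩)
          · exact Or.inl (Or.inl hm)
          · exact Or.inl (Or.inr hx)
          · exact Or.inr ⟨b', hb', hc, hx⟩
      · simp only [if_neg h, List.mem_cons]
        constructor
        · rintro (hm | ⟨b', hb', hc, hx⟩)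
          · exact Or.inl hm
          · exact Or.inr ⟨b', Or.inr hb', hc, hx⟩
        · rintro (hm | ⟨b', (rfl | hb'), hc, hx⟩)
          · exact Or.inl hm
          · exact absurd hc h
          · exact Or.inr ⟨b', hb', hc, hx⟩
  induction l generalizing m with
  | nil => simp
  | cons a l ih =>
    simp only [List.foldl_cons, ih, inner a m, List.mem_cons]
    constructor
    · rintro (⟨hm | ⟨b, hb, hc, hx⟩⟩ | ⟨a', ha', hrest⟩)
      · exact Or.inl hm
      · exact Or.inr ⟨a, Or.inl rfl, b, hb, hc, hx⟩
      · exact Or.inr ⟨a', Or.inr ha', hrest⟩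
    · rintro (hm | ⟨a', ha' | ha', hrest⟩)
      · exact Or.inl (Or.inl hm)
      · exact Or.inl (Or.inr (ha' ▸ hrest))
      · exact Or.inr ⟨a', ha', hrest⟩

-- A's doubly-nested conditional-add fold preserves Nodup
theorem nodup_foldl2_cond_add {α β : Type} (l : List α) (g : α → List β) (c : α → β → Bool)
    (v : α → β → String) (m : PySem.Set String) (hm : m.Nodup) :
    (l.foldl (fun m a => (g a).foldl (fun m b =>
        if c a b then PySem.Set.add m (v a b) else m) m) m).Nodup := by
  have inner : ∀ (a : α) (m : PySem.Set String), m.Nodup →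
      ((g a).foldl (fun m b => if c a b then PySem.Set.add m (v a b) else m) m).Nodup := by
    intro a
    induction g a with
    | nil => intro m hm; simpa
    | cons b bs ih =>
      intro m hm
      simp only [List.foldl_cons]
      apply ih
      by_cases h : c a b = true
      · simp only [h, if_true]; exact PySem.Set.nodup_add m _ hm
      · simpa [h]
  induction l generalizing m with
  | nil => simpa
  | cons a l ih => exact ih _ (inner a m hm)

-- a column's prefix matches and its qualifying underscore positions yield the same suffixes
theorem col_contrib (col : String) (prefixes : List String) (x : String) :
    (∃ p ∈ prefixes, PySem.Str.startswith col (p ++ "_") = true ∧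
        x = PySem.Str.slice col (some (PySem.Str.len p + 1)) none) ↔
    (∃ i ∈ PySem.List.pyRange 0 (PySem.Str.len col) 1,
        (PySem.Str.pyGet? col i == some '_' &&
         PySem.Set.contains (PySem.Set.ofList prefixes)
            (PySem.Str.slice col none (some i))) = true ∧
        x = PySem.Str.slice col (some (i + 1)) none) := by
  constructor
  · rintro ⟨p, hp, hsw, hx⟩
    have hsw' : p.toList ++ ['_'] <+: col.toList := by
      have h := (PySem.Chars.startswith_iff col.toList (p ++ "_").toList).mp
        (by rw [← PySem.Str.startswith_eq]; exact hsw)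
      simpa using h
    obtain ⟨t, ht⟩ := hsw'
    have ht' : col.toList = p.toList ++ '_' :: t := by rw [← ht]; simp
    have hlen : p.toList.length < col.toList.length := by
      rw [ht']; simp
    have hget : col.toList[p.toList.length]'hlen = '_' := by
      simp only [ht']
      rw [List.getElem_append_right (le_refl _)]
      simp
    have heq : PySem.Str.slice col none (some ((p.toList.length : Int))) = p := by
      apply String.toList_inj.mp
      rw [PySem.Str.toList_slice]
      simp [PySem.List.slice_to_natCast, ht']
    refine ⟨(p.toList.length : Int), ?_, ?_, ?_⟩
    · rw [PySem.List.mem_pyRange_one, PySem.Str.len_eq]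
      constructor
      · exact Int.natCast_nonneg _
      · exact_mod_cast hlen
    · simp only [Bool.and_eq_true]
      refine ⟨?_, ?_⟩
      · simp only [PySem.Str.pyGet?_natCast, beq_iff_eq]
        rw [List.getElem?_eq_getElem hlen, hget]
      · rw [heq, PySem.Set.contains_iff, PySem.Set.mem_ofList]
        exact hp
    · rw [hx]; simp [PySem.Str.len_eq]
  · rintro ⟨i, hmem, hcond, hx⟩
    rw [PySem.List.mem_pyRange_one] at hmem
    obtain ⟨h0, hlt⟩ := hmem
    rw [PySem.Str.len_eq] at hlt
    set k := i.toNat with hkdef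
    have hi0 : i = (k : Int) := by omega
    have hk : k < col.toList.length := by omega
    simp only [Bool.and_eq_true, beq_iff_eq] at hcond
    obtain ⟨hch', hpref⟩ := hcond
    rw [PySem.Set.contains_iff, PySem.Set.mem_ofList] at hpref
    have hslice : (PySem.Str.slice col none (some i)).toList = col.toList.take k := by
      rw [PySem.Str.toList_slice, hi0]
      simp [PySem.List.slice_to_natCast]
    have hunder : col.toList[k]'hk = '_' := by
      rw [hi0, PySem.Str.pyGet?_natCast, List.getElem?_eq_getElem hk] at hch'
      exact (Option.some_inj.mp hch')
    refine ⟨PySem.Str.slice col none (some i), hpref, ?_, ?_⟩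
    · rw [PySem.Str.startswith_eq]
      rw [PySem.Chars.startswith_iff]
      have htl : (PySem.Str.slice col none (some i) ++ "_").toList
          = col.toList.take k ++ ['_'] := by simp [hslice]
      rw [htl]
      refine ⟨col.toList.drop (k + 1), ?_⟩
      have : col.toList.drop k = '_' :: col.toList.drop (k + 1) := by
        rw [List.drop_eq_getElem_cons hk, hunder]
      calc col.toList.take k ++ ['_'] ++ col.toList.drop (k + 1)
          = col.toList.take k ++ col.toList.drop k := by rw [this]; simp
        _ = col.toList := List.take_append_drop k col.toList
    · rw [hx]
      have hlenS : PySem.Str.len (PySem.Str.slice col none (some i)) = (k : Int) := by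
        have hk' : k ≤ col.length := by simpa using Nat.le_of_lt hk
        rw [PySem.Str.len_eq, hslice]
        simp [List.length_take, Nat.min_eq_left hk']
      rw [hlenS, hi0]

-- ===== VERDICT (by name: the statement is the Claim_ definition above) =====
theorem get_metrics_from_cols_py_spec : Claim_equal_get_metrics_from_cols_py := by
  intro columns prefixes _
  unfold Spec_get_metrics_from_cols_py get_metrics_from_cols_py get_metrics_from_cols_py_alt
  apply PySem.List.sorted_eq_sorted_of_perm _ _ _ (fun a b h => h)
  apply (List.perm_ext_iff_of_nodup ?_ ?_).mpr
  · intro x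
    rw [mem_foldl2_cond_add columns (fun _ => prefixes)
        (fun col p => PySem.Str.startswith col (p ++ "_"))
        (fun col p => PySem.Str.slice col (some (PySem.Str.len p + 1)) none)]
    rw [PySem.Set.mem_ofList]
    simp only [List.mem_flatMap, List.mem_map, List.mem_filter,
      PySem.Set.empty, List.not_mem_nil, false_or]
    constructor
    · rintro ⟨col, hcol, rest⟩
      obtain ⟨i, hi, hc, hx⟩ := (col_contrib col prefixes x).mp rest
      exact ⟨col, hcol, i, ⟨hi, hc⟩, hx.symm⟩
    · rintro ⟨col, hcol, i, ⟨hi, hc⟩, hx⟩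
      exact ⟨col, hcol, (col_contrib col prefixes x).mpr ⟨i, hi, hc, hx.symm⟩⟩
  · exact nodup_foldl2_cond_add _ _ _ _ _ List.nodup_nil
  · exact PySem.Set.nodup_ofList _
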